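-- pv_equiv track=rewrite | github.com/Jay-SCM/Cactus | Cactus/Cactus.py | detect_custom_sequences
-- ===== SOURCE A (Python) =====
-- def detect_custom_sequences(numbers):
--     """Detect custom sequences from a list of numbers."""
--     if not numbers:
--         return []
--
--     custom_sequences = []
--
--     # Triangular numbers sequence
--     triangular_numbers = set()
--     n = 1
--     while (t := n * (n + 1) // 2) <= max(numbers):
--         triangular_numbers.add(t)
--         n += 1
--     if triangular_numbers:
--         custom_sequences.append(sorted(set(num for num in numbers if num in triangular_numbers)))
--
--     # Square numbers sequence
--     square_numbers = set()
--     n = 1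
--     while (s := n * n) <= max(numbers):
--         square_numbers.add(s)
--         n += 1
--     if square_numbers:
--         custom_sequences.append(sorted(set(num for num in numbers if num in square_numbers)))
--
--     return custom_sequences
-- ===== SOURCE B (Python) =====
-- def detect_custom_sequences(numbers):
--     """Detect custom sequences from a list of numbers."""
--     if not numbers:
--         return []
--     m = max(numbers)
--     if m < 1:
--         return []
--     present = set(numbers)
--     tri = []
--     n = 1
--     while (t := n * (n + 1) // 2) <= m:
--         if t in present:
--             tri.append(t)
--         n += 1
--     sq = []
--     n = 1
--     while (s := n * n) <= m:
--         if s in present: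
--             sq.append(s)
--         n += 1
--     return [tri, sq]
-- ===== Notes on version B (the rewrite author's own statement) =====
-- stated objective: faster
-- what changed: B flips the traversal: it computes max(numbers) and the input set once, then walks the generated ascending triangular/square sequences collecting members (already sorted and duplicate-free), instead of A's loops that re-evaluate max(numbers) in every while-condition and then sort+dedup the matching input elements.
import Mathlib
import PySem

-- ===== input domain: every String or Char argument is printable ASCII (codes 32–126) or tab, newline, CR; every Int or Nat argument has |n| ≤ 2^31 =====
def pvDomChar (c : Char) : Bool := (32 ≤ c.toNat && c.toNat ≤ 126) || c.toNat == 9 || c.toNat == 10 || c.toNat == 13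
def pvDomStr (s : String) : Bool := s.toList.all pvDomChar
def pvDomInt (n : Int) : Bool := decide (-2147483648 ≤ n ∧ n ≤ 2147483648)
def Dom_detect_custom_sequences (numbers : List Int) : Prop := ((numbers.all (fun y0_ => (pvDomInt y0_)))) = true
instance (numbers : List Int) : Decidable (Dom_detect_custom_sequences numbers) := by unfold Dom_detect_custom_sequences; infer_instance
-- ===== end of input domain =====

-- B is an alternative pass: it walks the generated ascending sequences testing membership in
-- the input set, instead of building sequence sets and sort+dedup-ing the matching inputs.


-- termination facts for the while-loops (cited by the ports' decreasing_by)
theorem pv_le_tri (n : Nat) : n ≤ n * (n + 1) / 2 := by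
  rcases Nat.eq_zero_or_pos n with h | h
  · simp [h]
  · have h1 : n * 2 ≤ n * (n + 1) := Nat.mul_le_mul_left n (by omega)
    omega

theorem pv_le_sq (n : Nat) : n ≤ n * n := by
  rcases Nat.eq_zero_or_pos n with h | h
  · simp [h]
  · exact Nat.le_mul_of_pos_left n h

-- ===== PORT A =====

-- the 'while (t := n*(n+1)//2) <= max(numbers)' loop building the triangular-number set.
-- t is strictly increasing, so Python's set.add always inserts a fresh element; the set is
-- kept as a reversed list (cons = insert) and reversed on exit — exact for this loop, and
-- it evaluates in linear time where Set.add's list scan would be quadratic.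
def triLoopA (m : Int) (n : Nat) (racc : List Int) : PySem.Set Int :=
  let t : Int := ((n * (n + 1) / 2 : Nat) : Int)
  if t ≤ m then triLoopA m (n + 1) (t :: racc) else racc.reverse
termination_by (m + 1 - n).toNat
decreasing_by
  have hn := pv_le_tri n
  omega

-- the 'while (s := n*n) <= max(numbers)' loop building the square-number set (same
-- reversed-accumulator rendering of set.add as triLoopA; s is strictly increasing)
def sqLoopA (m : Int) (n : Nat) (racc : List Int) : PySem.Set Int :=
  let s : Int := ((n * n : Nat) : Int)
  if s ≤ m then sqLoopA m (n + 1) (s :: racc) else racc.reverse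
termination_by (m + 1 - n).toNat
decreasing_by
  have hn := pv_le_sq n
  omega

def detect_custom_sequences (numbers : List Int) : List (List Int) :=
  if numbers = [] then []
  else
    let m := (PySem.List.max? numbers (fun x => x)).getD 0   -- max(numbers); list nonempty here
    let triangular := triLoopA m 1 PySem.Set.empty
    let cs₁ : List (List Int) :=
      if triangular ≠ [] then
        [PySem.List.sorted (PySem.Set.ofList (numbers.filter (fun num => PySem.Set.contains triangular num))) (fun x => x) false]
      else []
    let squares := sqLoopA m 1 PySem.Set.empty
    let cs₂ : List (List Int) :=
      if squares ≠ [] then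
        [PySem.List.sorted (PySem.Set.ofList (numbers.filter (fun num => PySem.Set.contains squares num))) (fun x => x) false]
      else []
    cs₁ ++ cs₂

-- ===== PORT B =====

-- B's triangular loop: walk t = n(n+1)//2 ≤ m, keep those present in the input set
def triLoopB (m : Int) (present : PySem.Set Int) (n : Nat) (acc : List Int) : List Int :=
  let t : Int := ((n * (n + 1) / 2 : Nat) : Int)
  if t ≤ m then
    triLoopB m present (n + 1) (if PySem.Set.contains present t then acc ++ [t] else acc)
  else acc
termination_by (m + 1 - n).toNat
decreasing_by
  have hn := pv_le_tri n
  omega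

-- B's square loop
def sqLoopB (m : Int) (present : PySem.Set Int) (n : Nat) (acc : List Int) : List Int :=
  let s : Int := ((n * n : Nat) : Int)
  if s ≤ m then
    sqLoopB m present (n + 1) (if PySem.Set.contains present s then acc ++ [s] else acc)
  else acc
termination_by (m + 1 - n).toNat
decreasing_by
  have hn := pv_le_sq n
  omega

def detect_custom_sequences_alt (numbers : List Int) : List (List Int) :=
  if numbers = [] then []
  else
    let m := (PySem.List.max? numbers (fun x => x)).getD 0
    if m < 1 then []
    else
      let present := PySem.Set.ofList numbers
      [triLoopB m present 1 [], sqLoopB m present 1 []]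

-- ===== PRECONDITION & SPEC =====
def Spec_detect_custom_sequences (numbers : List Int) (out : List (List Int)) : Prop := out = detect_custom_sequences_alt numbers
instance (numbers : List Int) (out : List (List Int)) : Decidable (Spec_detect_custom_sequences numbers out) := by unfold Spec_detect_custom_sequences; infer_instance

-- ===== CLAIM (what is proved, stated in full; the proofs are below) =====
def Claim_equal_detect_custom_sequences : Prop := ∀ (numbers : List Int), Dom_detect_custom_sequences numbers → Spec_detect_custom_sequences numbers (detect_custom_sequences numbers)

-- ===== LEMMAS AND PROOFS =====

theorem mem_triLoopA (m : Int) (n : Nat) (racc : List Int) (x : Int) :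
    x ∈ triLoopA m n racc ↔ x ∈ racc ∨ ∃ k : Nat, n ≤ k ∧ ((k * (k + 1) / 2 : Nat) : Int) = x ∧ x ≤ m := by
  fun_induction triLoopA m n racc with
  | case1 n acc t hle ih =>
    rw [ih]
    constructor
    · rintro (h | h)
      · rw [List.mem_cons] at h
        rcases h with h | h
        · exact Or.inr ⟨n, le_refl n, h.symm, h ▸ hle⟩
        · exact Or.inl h
      · rcases h with ⟨k, hk, he, hxm⟩
        exact Or.inr ⟨k, by omega, he, hxm⟩
    · rintro (h | ⟨k, hk, he, hxm⟩)
      · exact Or.inl (List.mem_cons_of_mem _ h)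
      · rcases Nat.eq_or_lt_of_le hk with rfl | hlt
        · exact Or.inl (he ▸ List.mem_cons_self)
        · exact Or.inr ⟨k, by omega, he, hxm⟩
  | case2 n acc t hle =>
    rw [List.mem_reverse]
    constructor
    · exact Or.inl
    · rintro (h | ⟨k, hk, he, hxm⟩)
      · exact h
      · exfalso
        have hmono : n * (n + 1) / 2 ≤ k * (k + 1) / 2 := by
          have := Nat.mul_le_mul hk (Nat.add_le_add hk (le_refl 1))
          omega
        have ht : t = ((n * (n + 1) / 2 : Nat) : Int) := rfl
        omega

theorem mem_sqLoopA (m : Int) (n : Nat) (racc : List Int) (x : Int) :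
    x ∈ sqLoopA m n racc ↔ x ∈ racc ∨ ∃ k : Nat, n ≤ k ∧ ((k * k : Nat) : Int) = x ∧ x ≤ m := by
  fun_induction sqLoopA m n racc with
  | case1 n acc t hle ih =>
    rw [ih]
    constructor
    · rintro (h | h)
      · rw [List.mem_cons] at h
        rcases h with h | h
        · exact Or.inr ⟨n, le_refl n, h.symm, h ▸ hle⟩
        · exact Or.inl h
      · rcases h with ⟨k, hk, he, hxm⟩
        exact Or.inr ⟨k, by omega, he, hxm⟩
    · rintro (h | ⟨k, hk, he, hxm⟩)
      · exact Or.inl (List.mem_cons_of_mem _ h)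
      · rcases Nat.eq_or_lt_of_le hk with rfl | hlt
        · exact Or.inl (he ▸ List.mem_cons_self)
        · exact Or.inr ⟨k, by omega, he, hxm⟩
  | case2 n acc t hle =>
    rw [List.mem_reverse]
    constructor
    · exact Or.inl
    · rintro (h | ⟨k, hk, he, hxm⟩)
      · exact h
      · exfalso
        have hmono : n * n ≤ k * k := Nat.mul_le_mul hk hk
        have ht : t = ((n * n : Nat) : Int) := rfl
        omega

theorem mem_triLoopB (m : Int) (p : PySem.Set Int) (n : Nat) (acc : List Int) (x : Int) :
    x ∈ triLoopB m p n acc ↔ x ∈ acc ∨ ((∃ k : Nat, n ≤ k ∧ ((k * (k + 1) / 2 : Nat) : Int) = x ∧ x ≤ m) ∧ PySem.Set.contains p x = true) := by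
  fun_induction triLoopB m p n acc with
  | case1 n acc t hle ih =>
    simp only [dite_eq_ite] at ih
    rw [ih]
    constructor
    · rintro (h | h)
      · by_cases hc : PySem.Set.contains p t = true
        · rw [if_pos hc, List.mem_append, List.mem_singleton] at h
          rcases h with h | rfl
          · exact Or.inl h
          · exact Or.inr ⟨⟨n, le_refl n, rfl, hle⟩, hc⟩
        · rw [if_neg hc] at h
          exact Or.inl h
      · rcases h with ⟨⟨k, hk, he, hxm⟩, hc⟩
        exact Or.inr ⟨⟨k, by omega, he, hxm⟩, hc⟩
    · rintro (h | ⟨⟨k, hk, he, hxm⟩, hc⟩)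
      · refine Or.inl ?_
        split
        · exact List.mem_append_left _ h
        · exact h
      · rcases Nat.eq_or_lt_of_le hk with rfl | hlt
        · refine Or.inl ?_
          have ht : t = x := he
          rw [if_pos (ht ▸ hc), ht]
          exact List.mem_append_right _ (List.mem_singleton.mpr rfl)
        · exact Or.inr ⟨⟨k, by omega, he, hxm⟩, hc⟩
  | case2 n acc t hle =>
    constructor
    · exact Or.inl
    · rintro (h | ⟨⟨k, hk, he, hxm⟩, hc⟩)
      · exact h
      · exfalso
        have hmono : n * (n + 1) / 2 ≤ k * (k + 1) / 2 := by
          have := Nat.mul_le_mul hk (Nat.add_le_add hk (le_refl 1))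
          omega
        have ht : t = ((n * (n + 1) / 2 : Nat) : Int) := rfl
        omega

theorem mem_sqLoopB (m : Int) (p : PySem.Set Int) (n : Nat) (acc : List Int) (x : Int) :
    x ∈ sqLoopB m p n acc ↔ x ∈ acc ∨ ((∃ k : Nat, n ≤ k ∧ ((k * k : Nat) : Int) = x ∧ x ≤ m) ∧ PySem.Set.contains p x = true) := by
  fun_induction sqLoopB m p n acc with
  | case1 n acc t hle ih =>
    simp only [dite_eq_ite] at ih
    rw [ih]
    constructor
    · rintro (h | h)
      · by_cases hc : PySem.Set.contains p t = true
        · rw [if_pos hc, List.mem_append, List.mem_singleton] at h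
          rcases h with h | rfl
          · exact Or.inl h
          · exact Or.inr ⟨⟨n, le_refl n, rfl, hle⟩, hc⟩
        · rw [if_neg hc] at h
          exact Or.inl h
      · rcases h with ⟨⟨k, hk, he, hxm⟩, hc⟩
        exact Or.inr ⟨⟨k, by omega, he, hxm⟩, hc⟩
    · rintro (h | ⟨⟨k, hk, he, hxm⟩, hc⟩)
      · refine Or.inl ?_
        split
        · exact List.mem_append_left _ h
        · exact h
      · rcases Nat.eq_or_lt_of_le hk with rfl | hlt
        · refine Or.inl ?_
          have ht : t = x := he
          rw [if_pos (ht ▸ hc), ht]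
          exact List.mem_append_right _ (List.mem_singleton.mpr rfl)
        · exact Or.inr ⟨⟨k, by omega, he, hxm⟩, hc⟩
  | case2 n acc t hle =>
    constructor
    · exact Or.inl
    · rintro (h | ⟨⟨k, hk, he, hxm⟩, hc⟩)
      · exact h
      · exfalso
        have hmono : n * n ≤ k * k := Nat.mul_le_mul hk hk
        have ht : t = ((n * n : Nat) : Int) := rfl
        omega

theorem pairwise_triLoopB (m : Int) (p : PySem.Set Int) (n : Nat) (acc : List Int)
    (hacc : acc.Pairwise (· < ·)) (hlt : ∀ a ∈ acc, a < ((n * (n + 1) / 2 : Nat) : Int)) :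
    (triLoopB m p n acc).Pairwise (· < ·) := by
  fun_induction triLoopB m p n acc with
  | case1 n acc t hle ih =>
    simp only [dite_eq_ite] at ih
    apply ih
    · split
      · exact List.pairwise_append.mpr ⟨hacc, List.pairwise_singleton _ _,
          fun a ha b hb => (List.mem_singleton.mp hb) ▸ hlt a ha⟩
      · exact hacc
    · have hstep : n * (n + 1) / 2 < (n + 1) * (n + 1 + 1) / 2 := by
        have h2 : (n + 1) * (n + 1 + 1) = n * (n + 1) + 2 * (n + 1) := by ring
        omega
      intro a ha
      split at ha
      · rcases List.mem_append.mp ha with h | h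
        · exact (hlt a h).trans (by exact_mod_cast hstep)
        · have ht : t = ((n * (n + 1) / 2 : Nat) : Int) := rfl
          rw [List.mem_singleton.mp h, ht]
          exact_mod_cast hstep
      · exact (hlt a ha).trans (by exact_mod_cast hstep)
  | case2 n acc t hle => exact hacc

theorem pairwise_sqLoopB (m : Int) (p : PySem.Set Int) (n : Nat) (acc : List Int)
    (hacc : acc.Pairwise (· < ·)) (hlt : ∀ a ∈ acc, a < ((n * n : Nat) : Int)) :
    (sqLoopB m p n acc).Pairwise (· < ·) := by
  fun_induction sqLoopB m p n acc with
  | case1 n acc t hle ih =>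
    simp only [dite_eq_ite] at ih
    apply ih
    · split
      · exact List.pairwise_append.mpr ⟨hacc, List.pairwise_singleton _ _,
          fun a ha b hb => (List.mem_singleton.mp hb) ▸ hlt a ha⟩
      · exact hacc
    · have hstep : n * n < (n + 1) * (n + 1) := by nlinarith
      intro a ha
      split at ha
      · rcases List.mem_append.mp ha with h | h
        · exact (hlt a h).trans (by exact_mod_cast hstep)
        · have ht : t = ((n * n : Nat) : Int) := rfl
          rw [List.mem_singleton.mp h, ht]
          exact_mod_cast hstep
      · exact (hlt a ha).trans (by exact_mod_cast hstep)
  | case2 n acc t hle => exact hacc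

theorem tri_eq (numbers : List Int) (m : Int) :
    PySem.List.sorted (PySem.Set.ofList (numbers.filter (fun num => PySem.Set.contains (triLoopA m 1 PySem.Set.empty) num))) (fun x => x) false
      = triLoopB m (PySem.Set.ofList numbers) 1 [] := by
  apply PySem.List.sorted_eq_of_perm_of_pairwise_lt
  · rw [List.perm_ext_iff_of_nodup
      ((pairwise_triLoopB m _ 1 [] (by simp) (by simp)).imp fun h => ne_of_lt h)
      (PySem.Set.nodup_ofList _)]
    intro a
    simp only [mem_triLoopB, PySem.Set.contains_iff, mem_triLoopA, PySem.Set.mem_ofList,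
      List.mem_filter, PySem.Set.empty, List.not_mem_nil, false_or]
    tauto
  · exact pairwise_triLoopB m _ 1 [] (by simp) (by simp)

theorem sq_eq (numbers : List Int) (m : Int) :
    PySem.List.sorted (PySem.Set.ofList (numbers.filter (fun num => PySem.Set.contains (sqLoopA m 1 PySem.Set.empty) num))) (fun x => x) false
      = sqLoopB m (PySem.Set.ofList numbers) 1 [] := by
  apply PySem.List.sorted_eq_of_perm_of_pairwise_lt
  · rw [List.perm_ext_iff_of_nodup
      ((pairwise_sqLoopB m _ 1 [] (by simp) (by simp)).imp fun h => ne_of_lt h)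
      (PySem.Set.nodup_ofList _)]
    intro a
    simp only [mem_sqLoopB, PySem.Set.contains_iff, mem_sqLoopA, PySem.Set.mem_ofList,
      List.mem_filter, PySem.Set.empty, List.not_mem_nil, false_or]
    tauto
  · exact pairwise_sqLoopB m _ 1 [] (by simp) (by simp)

theorem triLoopA_stop (m : Int) (hm : m < 1) : triLoopA m 1 PySem.Set.empty = PySem.Set.empty := by
  rw [triLoopA]
  norm_num
  omega

theorem sqLoopA_stop (m : Int) (hm : m < 1) : sqLoopA m 1 PySem.Set.empty = PySem.Set.empty := by
  rw [sqLoopA]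
  norm_num
  omega

theorem triLoopA_ne (m : Int) (hm : 1 ≤ m) : triLoopA m 1 PySem.Set.empty ≠ [] := by
  apply List.ne_nil_of_mem (a := (1 : Int))
  rw [mem_triLoopA]
  exact Or.inr ⟨1, le_refl 1, by norm_num, hm⟩

theorem sqLoopA_ne (m : Int) (hm : 1 ≤ m) : sqLoopA m 1 PySem.Set.empty ≠ [] := by
  apply List.ne_nil_of_mem (a := (1 : Int))
  rw [mem_sqLoopA]
  exact Or.inr ⟨1, le_refl 1, by norm_num, hm⟩

-- ===== VERDICT (by name: the statement is the Claim_ definition above) =====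
theorem detect_custom_sequences_spec : Claim_equal_detect_custom_sequences := by
  intro numbers _
  unfold Spec_detect_custom_sequences detect_custom_sequences detect_custom_sequences_alt
  dsimp only
  by_cases hnil : numbers = []
  · simp [hnil]
  · rw [if_neg hnil, if_neg hnil]
    by_cases hm1 : (PySem.List.max? numbers fun x => x).getD 0 < 1
    · rw [if_pos hm1, triLoopA_stop _ hm1, sqLoopA_stop _ hm1]
      simp [PySem.Set.empty]
    · rw [if_neg hm1]
      rw [Int.not_lt] at hm1
      rw [if_pos (triLoopA_ne _ hm1), if_pos (sqLoopA_ne _ hm1)]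
      rw [tri_eq, sq_eq]
      rfl
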